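-- pv_equiv track=rewrite | github.com/quolph/Coachable-Julian-Seymour-Repository | leetcode/2598_smallest_missing_non-negative_integer_after_operations.py | findSmallestIntegerSlow
-- ===== SOURCE A (Python) =====
-- from typing import List
-- from collections import defaultdict
--
-- def findSmallestIntegerSlow(nums: List[int], value: int) -> int:
--     if value == 1:
--         return len(nums)
--     uniques = defaultdict(int)
--     for num in nums:
--         uniques[num] += 1
--     counter = defaultdict(int)
--     for i, num in enumerate(nums):
--         if num < 0:
--             num = -num % value
--             if num != 0:
--                 num = value - num
--         else:
--             num %= value
--         counter[num] += 1
--     for i in range(len(nums)):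
--         if i not in counter:
--             return i
--         if counter[i] > 1:
--             num = i
--             while counter[i] > 1 and num < len(nums):
--                 counter[i] -= 1
--                 if counter[i] == 0:
--                     counter.pop(i)
--                 num += value
--                 counter[num] += 1
--     return len(nums)
-- ===== SOURCE B (Python) =====
-- def findSmallestIntegerSlow(nums, value):
--     counts = {}
--     for x in nums:
--         r = x % value
--         counts[r] = counts.get(r, 0) + 1
--     # The answer is min over residues r of counts[r]*value + r; residues above
--     # len(nums) can never give the minimum, so the scan is capped at len(nums)+1.
--     return min(counts.get(r, 0) * value + r for r in range(min(value, len(nums) + 1)))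
-- ===== Notes on version B (the rewrite author's own statement) =====
-- stated objective: faster
-- what changed: A simulates the operations: it builds a counter of residues and then walks i = 0..n-1 redistributing surplus counts upward by value with an inner while loop; B computes the answer in closed form as min over residues r (capped at len(nums)+1) of count[r]*value + r, with no simulation loop.
-- outside the precondition, e.g. on findSmallestIntegerSlow([1, 2, -3], -2): A returns 1, B raises ValueError
import Mathlib
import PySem

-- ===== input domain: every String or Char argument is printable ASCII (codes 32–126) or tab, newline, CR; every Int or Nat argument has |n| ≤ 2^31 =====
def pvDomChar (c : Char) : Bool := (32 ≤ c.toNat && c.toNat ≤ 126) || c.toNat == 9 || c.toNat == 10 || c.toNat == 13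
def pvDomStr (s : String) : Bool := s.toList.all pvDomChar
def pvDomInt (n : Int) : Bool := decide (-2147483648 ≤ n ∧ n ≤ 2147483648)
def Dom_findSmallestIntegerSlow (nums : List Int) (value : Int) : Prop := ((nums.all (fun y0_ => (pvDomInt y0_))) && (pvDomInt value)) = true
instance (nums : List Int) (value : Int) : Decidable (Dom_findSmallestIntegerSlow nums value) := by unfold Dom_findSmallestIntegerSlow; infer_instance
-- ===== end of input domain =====

-- B replaces A's counter-redistribution simulation of the operations by the closed form
-- min over residues r of count[r]*value + r (scan capped at len(nums)+1); measured faster by a constant factor.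

-- ===== PORT A =====
def pvResA (num value : Int) : Int :=
  if num < 0 then
    let m := PySem.Int.mod (-num) value
    if m ≠ 0 then value - m else m
  else PySem.Int.mod num value

def pvInnerA (n : Nat) (value i : Int) : Nat → PySem.Dict Int Int → Int → PySem.Dict Int Int
  | 0, d, _ => d
  | fuel+1, d, num =>
    if d.getD i 0 > 1 ∧ num < (n : Int) then
      let d1 := d.modify i 0 (· - 1)
      let d2 := if d1.getD i 0 = 0 then d1.erase i else d1
      let num' := num + value
      let d3 := d2.modify num' 0 (· + 1)
      pvInnerA n value i fuel d3 num'
    else d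

def pvOuterA (n : Nat) (value : Int) : List Int → PySem.Dict Int Int → Int
  | [], _ => (n : Int)
  | i :: rest, d =>
    if d.contains i = false then i
    else if d.getD i 0 > 1 then pvOuterA n value rest (pvInnerA n value i (n+1) d i)
    else pvOuterA n value rest d

def findSmallestIntegerSlow (nums : List Int) (value : Int) : Int :=
  if value = 1 then (nums.length : Int)
  else
    let _uniques := nums.foldl (fun d x => d.modify x 0 (· + 1)) (PySem.Dict.empty : PySem.Dict Int Int)
    let counter := (PySem.List.enumerate nums 0).foldl
      (fun d p => d.modify (pvResA p.2 value) 0 (· + 1)) (PySem.Dict.empty : PySem.Dict Int Int)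
    pvOuterA nums.length value (PySem.List.pyRange 0 (nums.length : Int)) counter

-- ===== PORT B =====
def findSmallestIntegerSlow_alt (nums : List Int) (value : Int) : Int :=
  let counts := nums.foldl
    (fun d x => let r := PySem.Int.mod x value; d.insert r (d.getD r 0 + 1))
    (PySem.Dict.empty : PySem.Dict Int Int)
  match PySem.List.min?
      ((PySem.List.pyRange 0 (min value ((nums.length : Int) + 1))).map
        (fun r => counts.getD r 0 * value + r)) (fun y => y) with
  | some m => m
  | none => 0
-- ===== PRECONDITION & SPEC =====
-- Pre_ excludes value ≤ 0: at value = 0 A raises ZeroDivisionError; for value < 0 A's redistribution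
-- walks residues of the wrong sign and returns an accidental value, and B (like A at value = 0) raises there.
def Pre_findSmallestIntegerSlow (nums : List Int) (value : Int) : Prop := 1 ≤ value
instance (nums : List Int) (value : Int) : Decidable (Pre_findSmallestIntegerSlow nums value) := by unfold Pre_findSmallestIntegerSlow; infer_instance
def pvWitness_findSmallestIntegerSlow : List Int × Int := ([0, 3, -2], 2)

def Spec_findSmallestIntegerSlow (nums : List Int) (value : Int) (out : Int) : Prop := out = findSmallestIntegerSlow_alt nums value
instance (nums : List Int) (value : Int) (out : Int) : Decidable (Spec_findSmallestIntegerSlow nums value out) := by unfold Spec_findSmallestIntegerSlow; infer_instance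

-- ===== CLAIM (what is proved, stated in full; the proofs are below) =====
def Claim_equal_findSmallestIntegerSlow : Prop := ∀ (nums : List Int) (value : Int), Dom_findSmallestIntegerSlow nums value → Pre_findSmallestIntegerSlow nums value → Spec_findSmallestIntegerSlow nums value (findSmallestIntegerSlow nums value)

-- ===== LEMMAS AND PROOFS =====

-- residue count of the input list
def cN (nums : List Int) (v r : Int) : Int := ((nums.map (fun x => x % v)).count r : Int)

-- value of A's counter at key k at the start of outer iteration i (for v ≥ 1)
def valN (nums : List Int) (v i k : Int) : Int :=
  if i ≤ k % v then (if k < v then cN nums v k else 0)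
  else if 1 ≤ k / v ∧ k / v ≤ cN nums v (k % v) - 1 ∧ k < (nums.length : Int) + v then 1 else 0

-- position j needs no further item: its residue class is exhausted at or before j
def badN (nums : List Int) (v j : Int) : Prop := cN nums v (j % v) * v + (j % v) ≤ j

-- counter invariant at the start of outer iteration i
def INVN (nums : List Int) (v i : Int) (d : PySem.Dict Int Int) : Prop :=
  ∀ k : Int, i ≤ k → d.getD k 0 = valN nums v i k ∧ (d.contains k = true ↔ valN nums v i k ≠ 0)

theorem cN_nonneg (nums : List Int) (v r : Int) : 0 ≤ cN nums v r := by unfold cN; positivity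

theorem cN_le_len (nums : List Int) (v r : Int) : cN nums v r ≤ (nums.length : Int) := by
  unfold cN
  have := List.count_le_length (l := nums.map (fun x => x % v)) (a := r)
  simp at this ⊢; omega

theorem pvResA_eq (x v : Int) (hv : 1 ≤ v) : pvResA x v = PySem.Int.mod x v := by
  unfold pvResA
  rw [PySem.Int.mod_eq_emod_of_pos (by omega), PySem.Int.mod_eq_emod_of_pos (by omega)]
  by_cases hx : x < 0
  · simp only [hx, if_true]
    have h1 : 0 ≤ x % v := Int.emod_nonneg x (by omega)
    have h2 : x % v < v := Int.emod_lt_of_pos x (by omega)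
    have h3 : 0 ≤ (-x) % v := Int.emod_nonneg (-x) (by omega)
    have h4 : (-x) % v < v := Int.emod_lt_of_pos (-x) (by omega)
    have h5 : (x % v + (-x) % v) % v = 0 := by
      rw [← Int.add_emod]; simp
    obtain ⟨k, hk⟩ := Int.dvd_of_emod_eq_zero h5
    have hk0 : 0 ≤ k := by nlinarith
    have hk2 : k < 2 := by nlinarith
    interval_cases k <;> by_cases h6 : (-x) % v = 0 <;> simp [h6] <;> omega
  · simp [hx]

theorem badN_iff (nums : List Int) (v j : Int) (hv : 1 ≤ v) :
    badN nums v j ↔ cN nums v (j % v) ≤ j / v := by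
  unfold badN
  have h : (j / v) * v + j % v = j := by
    have h0 := Int.ediv_add_emod j v; rw [mul_comm] at h0; exact h0
  constructor
  · intro h1
    have : cN nums v (j % v) * v ≤ (j / v) * v := by omega
    exact le_of_mul_le_mul_right this (by omega)
  · intro h1
    have : cN nums v (j % v) * v ≤ (j / v) * v := mul_le_mul_of_nonneg_right h1 (by omega)
    omega

theorem sum_ind (rng : List Int) (x : Int) (h : rng.Nodup) :
    ((rng.map (fun r => if r = x then (1 : Int) else 0)).sum) = if x ∈ rng then 1 else 0 := by
  induction rng with
  | nil => simp
  | cons a t ih =>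
    rcases List.nodup_cons.mp h with ⟨ha, ht⟩
    by_cases hx : a = x
    · subst hx; simp [ih ht, ha]
    · have : (x ∈ a :: t) = (x ∈ t) := by
        simp [List.mem_cons]; intro hxa; exact absurd hxa.symm hx
      simp [hx, ih ht, this]

theorem count_sum_eq (l rng : List Int) (h : rng.Nodup) (hcov : ∀ x ∈ l, x ∈ rng) :
    ((rng.map (fun r => (l.count r : Int))).sum) = (l.length : Int) := by
  induction l with
  | nil => simp
  | cons x l ih =>
    have hx : x ∈ rng := hcov x (List.mem_cons_self ..)
    have hstep : rng.map (fun r => ((x :: l).count r : Int)) =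
        rng.map (fun r => (l.count r : Int) + (if r = x then 1 else 0)) := by
      apply List.map_congr_left; intro r _
      rw [List.count_cons]; push_cast; by_cases hrx : r = x <;> simp [hrx] <;> omega
    rw [hstep, PySem.List.sum_map_add_int, ih (fun y hy => hcov y (List.mem_cons_of_mem _ hy)),
        sum_ind rng x h, if_pos hx]
    push_cast [List.length_cons]
    ring

theorem count_sum_le (l rng : List Int) (h : rng.Nodup) :
    ((rng.map (fun r => (l.count r : Int))).sum) ≤ (l.length : Int) := by
  induction l with
  | nil => simp
  | cons x l ih =>
    have hstep : rng.map (fun r => ((x :: l).count r : Int)) =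
        rng.map (fun r => (l.count r : Int) + (if r = x then 1 else 0)) := by
      apply List.map_congr_left; intro r _
      rw [List.count_cons]; push_cast; by_cases hrx : r = x <;> simp [hrx] <;> omega
    rw [hstep, PySem.List.sum_map_add_int, sum_ind rng x h]
    by_cases hx : x ∈ rng <;> simp [hx] <;> push_cast <;> omega

theorem floor_step (v a : Int) (hv : 1 ≤ v) :
    (a + 1) / v = a / v + (if (a + 1) % v = 0 then 1 else 0) := by
  have h0 := Int.ediv_add_emod a v
  have h1 : 0 ≤ a % v := Int.emod_nonneg a (by omega)
  have h2 : a % v < v := Int.emod_lt_of_pos a (by omega)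
  by_cases hc : a % v = v - 1
  · have hq : (a + 1) / v = a / v + 1 ∧ (a + 1) % v = 0 :=
      (Int.ediv_emod_unique (by omega)).mpr (by constructor; nlinarith; omega)
    rw [hq.1, hq.2]; simp
  · have hq : (a + 1) / v = a / v ∧ (a + 1) % v = a % v + 1 :=
      (Int.ediv_emod_unique (by omega)).mpr (by constructor; nlinarith; omega)
    rw [hq.1, hq.2]
    have : ¬ (a % v + 1 = 0) := by omega
    simp [this]

theorem emod_char (v a r : Int) (hv : 1 ≤ v) (hr0 : 0 ≤ r) (hrv : r < v) :
    a % v = r ↔ (a - r) % v = 0 := by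
  constructor
  · intro h
    have h0 := Int.ediv_add_emod a v
    have : a - r = v * (a / v) := by omega
    rw [this]; exact Int.mul_emod_right v (a / v)
  · intro h
    obtain ⟨k, hk⟩ := Int.dvd_of_emod_eq_zero h
    have : a = v * k + r := by omega
    rw [this, add_comm, Int.add_mul_emod_self_left]
    exact Int.emod_eq_of_lt hr0 hrv

theorem floor_sum (v : Int) (hv : 1 ≤ v) : ∀ (n : Nat),
    (((PySem.List.pyRange 0 v).map (fun r => ((n : Int) - r) / v + 1)).sum) = (n : Int) + 1 := by
  intro n
  induction n with
  | zero =>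
    have hrest : (PySem.List.pyRange 0 v).map (fun r => (((0:Nat):Int) - r) / v + 1) =
        (PySem.List.pyRange 0 v).map (fun r => if r = 0 then (1:Int) else 0) := by
      apply List.map_congr_left; intro r hr
      rw [PySem.List.mem_pyRange_one] at hr
      by_cases h0 : r = 0
      · subst h0; norm_num
      · have hne : (0 - r) / v = -1 := by
          have := (Int.ediv_emod_unique (b := v) (a := 0 - r) (q := -1) (r := v - r) (by omega)).mpr
            (by omega)
          exact this.1
        rw [Nat.cast_zero, hne]; simp [h0]
    rw [hrest, sum_ind _ _ (PySem.List.nodup_pyRange_one 0 v), if_pos]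
    · norm_num
    · rw [PySem.List.mem_pyRange_one]; omega
  | succ n ih =>
    push_cast
    have hstep : (PySem.List.pyRange 0 v).map (fun r => ((n : Int) + 1 - r) / v + 1) =
        (PySem.List.pyRange 0 v).map (fun r => (((n : Int) - r) / v + 1) + (if r = ((n : Int) + 1) % v then 1 else 0)) := by
      apply List.map_congr_left; intro r hr
      rw [PySem.List.mem_pyRange_one] at hr
      have h1 : ((n : Int) + 1 - r) = ((n : Int) - r) + 1 := by ring
      rw [h1, floor_step v ((n : Int) - r) hv]
      have h2 : (((n : Int) - r) + 1) % v = 0 ↔ r = ((n : Int) + 1) % v := by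
        have h3 := emod_char v ((n : Int) + 1) r hv hr.1 hr.2
        constructor
        · intro h4; exact (h3.mpr (by rw [← h4]; ring_nf)).symm
        · intro h4; have := h3.mp h4.symm; rw [← this]; ring_nf
      by_cases hcase : (((n : Int) - r) + 1) % v = 0
      · rw [if_pos hcase, if_pos (h2.mp hcase)]; try ring
      · rw [if_neg hcase, if_neg (fun hh => hcase (h2.mpr hh))]; try ring
    rw [hstep, PySem.List.sum_map_add_int, ih, sum_ind _ _ (PySem.List.nodup_pyRange_one 0 v)]
    have hmem : ((n : Int) + 1) % v ∈ PySem.List.pyRange 0 v := by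
      rw [PySem.List.mem_pyRange_one]
      exact ⟨Int.emod_nonneg _ (by omega), Int.emod_lt_of_pos _ (by omega)⟩
    rw [if_pos hmem]
    try push_cast
    try ring

theorem alt_spec (nums : List Int) (v : Int) (hv : 1 ≤ v) :
    (∃ r, 0 ≤ r ∧ r < min v ((nums.length : Int) + 1) ∧
        findSmallestIntegerSlow_alt nums v = cN nums v r * v + r) ∧
    (∀ r, 0 ≤ r → r < min v ((nums.length : Int) + 1) →
        findSmallestIntegerSlow_alt nums v ≤ cN nums v r * v + r) := by
  unfold findSmallestIntegerSlow_alt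
  rw [show (fun (d : PySem.Dict Int Int) (x : Int) =>
        let r := PySem.Int.mod x v; d.insert r (d.getD r 0 + 1)) =
      (fun (d : PySem.Dict Int Int) (x : Int) =>
        d.insert (PySem.Int.mod x v) (d.getD (PySem.Int.mod x v) 0 + 1)) from rfl]
  have hmap : nums.map (fun x => PySem.Int.mod x v) = nums.map (fun x => x % v) :=
    List.map_congr_left (fun x _ => PySem.Int.mod_eq_emod_of_pos (by omega))
  have hcnt : nums.foldl
      (fun (d : PySem.Dict Int Int) (x : Int) =>
        d.insert (PySem.Int.mod x v) (d.getD (PySem.Int.mod x v) 0 + 1))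
      (PySem.Dict.empty : PySem.Dict Int Int)
      = PySem.Dict.counter (nums.map (fun x => x % v)) := by
    rw [← hmap, ← PySem.Dict.foldl_insert_getD_add_one_eq_counter, List.foldl_map]
  rw [hcnt]
  simp only [PySem.Dict.getD_counter]
  have hR : 0 < min v ((nums.length : Int) + 1) := by
    have : (0:Int) ≤ (nums.length : Int) := by positivity
    omega
  rcases hm : PySem.List.min?
      ((PySem.List.pyRange 0 (min v ((nums.length : Int) + 1))).map
        (fun r => ((nums.map (fun x => x % v)).count r : Int) * v + r)) (fun y => y) with _ | m
  · exfalso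
    rw [PySem.List.min?_eq_none_iff] at hm
    rw [PySem.List.pyRange_one_cons hR] at hm
    simp at hm
  · have hmem := PySem.List.min?_mem hm
    have hmin := PySem.List.min?_isMin hm
    rw [List.mem_map] at hmem
    obtain ⟨r, hr, hfr⟩ := hmem
    rw [PySem.List.mem_pyRange_one] at hr
    constructor
    · exact ⟨r, hr.1, hr.2, by rw [← hfr]; rfl⟩
    · intro r' h0 h1
      have : ((nums.map (fun x => x % v)).count r' : Int) * v + r' ∈
          (PySem.List.pyRange 0 (min v ((nums.length : Int) + 1))).map
            (fun r => ((nums.map (fun x => x % v)).count r : Int) * v + r) :=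
        List.mem_map.mpr ⟨r', PySem.List.mem_pyRange_one.mpr ⟨h0, h1⟩, rfl⟩
      exact hmin _ this

theorem alt_le_len (nums : List Int) (v : Int) (hv : 1 ≤ v) :
    findSmallestIntegerSlow_alt nums v ≤ (nums.length : Int) := by
  obtain ⟨⟨r, hr0, hrR, heq⟩, hmin⟩ := alt_spec nums v hv
  by_contra hgt
  push_neg at hgt
  have hM : ∀ r', 0 ≤ r' → r' < min v ((nums.length : Int) + 1) → (nums.length : Int) + 1 ≤ cN nums v r' * v + r' := by
    intro r' h0 h1
    have := hmin r' h0 h1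
    omega
  by_cases hvn : v ≤ (nums.length : Int) + 1
  · -- full residue range: pigeonhole via the floor sum
    have hrng : min v ((nums.length : Int) + 1) = v := by omega
    rw [hrng] at hM
    have hge : ∀ r' ∈ PySem.List.pyRange 0 v,
        ((nums.length : Int) - r') / v + 1 ≤ cN nums v r' := by
      intro r' hr'
      rw [PySem.List.mem_pyRange_one] at hr'
      have h2 := hM r' hr'.1 hr'.2
      have h3 : (nums.length : Int) - r' < cN nums v r' * v := by omega
      have := (Int.ediv_lt_iff_lt_mul (a := (nums.length : Int) - r') (b := cN nums v r') (c := v) (by omega)).mpr h3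
      omega
    have hsum1 : (((PySem.List.pyRange 0 v).map (fun r => ((nums.length : Int) - r) / v + 1)).sum) ≤
        (((PySem.List.pyRange 0 v).map (fun r => cN nums v r)).sum) :=
      List.sum_le_sum hge
    rw [floor_sum v hv nums.length] at hsum1
    have hcov : ∀ x ∈ nums.map (fun x => x % v), x ∈ PySem.List.pyRange 0 v := by
      intro x hx
      rw [List.mem_map] at hx
      obtain ⟨y, _, rfl⟩ := hx
      rw [PySem.List.mem_pyRange_one]
      exact ⟨Int.emod_nonneg y (by omega), Int.emod_lt_of_pos y (by omega)⟩
    have hs := count_sum_eq (nums.map (fun x => x % v)) (PySem.List.pyRange 0 v)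
      (PySem.List.nodup_pyRange_one 0 v) hcov
    simp only [List.length_map] at hs
    simp only [cN] at hsum1
    rw [hs] at hsum1
    omega
  · -- v > (nums.length : Int)+1: every residue 0..n must occur, exceeding the list length
    have hrng : min v ((nums.length : Int) + 1) = (nums.length : Int) + 1 := by omega
    rw [hrng] at hM
    have hge : ∀ r' ∈ PySem.List.pyRange 0 ((nums.length : Int)+1), (1:Int) ≤ cN nums v r' := by
      intro r' hr'
      rw [PySem.List.mem_pyRange_one] at hr'
      have h2 := hM r' hr'.1 hr'.2
      have h3 := cN_nonneg nums v r'
      rcases Int.lt_or_le 0 (cN nums v r') with h | h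
      · omega
      · have h4 : cN nums v r' = 0 := by omega
        rw [h4] at h2; omega
    have hsum1 : ((PySem.List.pyRange 0 ((nums.length : Int)+1)).map (fun _ => (1:Int))).sum ≤
        ((PySem.List.pyRange 0 ((nums.length : Int)+1)).map (fun r => cN nums v r)).sum :=
      List.sum_le_sum hge
    rw [PySem.List.sum_map_const_int] at hsum1
    have hlen : ((PySem.List.pyRange 0 ((nums.length : Int)+1)).length : Int) = (nums.length : Int) + 1 := by
      rw [PySem.List.length_pyRange_one]
      omega
    have hs := count_sum_le (nums.map (fun x => x % v)) (PySem.List.pyRange 0 ((nums.length : Int)+1))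
      (PySem.List.nodup_pyRange_one 0 ((nums.length : Int)+1))
    simp only [List.length_map] at hs
    have hsum2 : ((PySem.List.pyRange 0 ((nums.length : Int)+1)).map (fun r => cN nums v r)).sum ≤ (nums.length : Int) := by
      simp only [cN]
      exact hs
    rw [hlen] at hsum1
    omega

theorem alt_bad (nums : List Int) (v : Int) (hv : 1 ≤ v) :
    badN nums v (findSmallestIntegerSlow_alt nums v) ∧ 0 ≤ findSmallestIntegerSlow_alt nums v := by
  obtain ⟨⟨r, hr0, hrR, heq⟩, _⟩ := alt_spec nums v hv
  have hrv : r < v := by omega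
  have hc := cN_nonneg nums v r
  have hcv : 0 ≤ cN nums v r * v := mul_nonneg hc (by omega)
  have hmod : findSmallestIntegerSlow_alt nums v % v = r := by
    rw [heq, add_comm, Int.add_mul_emod_self_right]
    exact Int.emod_eq_of_lt hr0 hrv
  constructor
  · unfold badN
    rw [hmod, heq]
  · omega

theorem alt_min (nums : List Int) (v : Int) (hv : 1 ≤ v) :
    ∀ j, 0 ≤ j → j < findSmallestIntegerSlow_alt nums v → ¬ badN nums v j := by
  intro j hj0 hjM hbad
  obtain ⟨_, hmin⟩ := alt_spec nums v hv
  have hMn := alt_le_len nums v hv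
  have hr0 : 0 ≤ j % v := Int.emod_nonneg j (by omega)
  have hrv : j % v < v := Int.emod_lt_of_pos j (by omega)
  have hrj : j % v ≤ j := by
    by_cases h : j < v
    · rw [Int.emod_eq_of_lt hj0 h]
    · omega
  have h2 : j % v < min v ((nums.length : Int) + 1) := by omega
  have h3 := hmin (j % v) hr0 h2
  unfold badN at hbad
  omega

theorem inner_spec (n : Nat) (v i : Int) (hv : 1 ≤ v) :
    ∀ (fuel : Nat) (d : PySem.Dict Int Int) (num : Int), i ≤ num →
    d.getD i 0 ≤ (fuel : Int) → 1 ≤ d.getD i 0 →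
    (∀ k, (pvInnerA n v i fuel d num).getD k 0 =
        if k = i then d.getD i 0 - max 0 (min (d.getD i 0 - 1) (((n : Int) - num + v - 1) / v))
        else d.getD k 0 + (if num < k ∧ k ≤ num + max 0 (min (d.getD i 0 - 1) (((n : Int) - num + v - 1) / v)) * v ∧ (k - num) % v = 0 then 1 else 0)) ∧
    (∀ k, k ≠ i → (pvInnerA n v i fuel d num).contains k =
        (d.contains k || decide (num < k ∧ k ≤ num + max 0 (min (d.getD i 0 - 1) (((n : Int) - num + v - 1) / v)) * v ∧ (k - num) % v = 0))) := by
  intro fuel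
  induction fuel with
  | zero =>
    intro d num h1 h2 h3
    exfalso; push_cast at h2; omega
  | succ f ih =>
    intro d num hile hfuel h1
    by_cases hcond : d.getD i 0 > 1 ∧ num < (n : Int)
    case pos =>
      have hd1i : (d.modify i 0 (· - 1)).getD i 0 = d.getD i 0 - 1 :=
        PySem.Dict.getD_modify_self d i 0 (· - 1)
      have hstep : pvInnerA n v i (f+1) d num =
          pvInnerA n v i f ((d.modify i 0 (· - 1)).modify (num + v) 0 (· + 1)) (num + v) := by
        simp only [pvInnerA, if_pos hcond, hd1i]
        rw [if_neg (by omega)]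
      set d3 := (d.modify i 0 (· - 1)).modify (num + v) 0 (· + 1) with hd3
      have hd3i : d3.getD i 0 = d.getD i 0 - 1 := by
        rw [hd3, PySem.Dict.getD_modify, if_neg (by omega), hd1i]
      have hd3k : ∀ k, k ≠ i → d3.getD k 0 = d.getD k 0 + (if k = num + v then 1 else 0) := by
        intro k hk
        have hne2 : ¬ (num + v = i) := by omega
        simp only [hd3, PySem.Dict.getD_modify]
        rw [if_neg hne2, if_neg hk]
        by_cases hkn : k = num + v
        · rw [if_pos hkn, if_pos hkn, ← hkn]
        · rw [if_neg hkn, if_neg hkn]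
          omega
      have hd3c : ∀ k, k ≠ i → d3.contains k = ((k == num + v) || d.contains k) := by
        intro k hk
        rw [hd3, PySem.Dict.contains_modify, PySem.Dict.contains_modify]
        have hne : (k == i) = false := by simp [hk]
        rw [hne]; simp
      have ihh := ih d3 (num + v) (by omega) (by rw [hd3i]; push_cast; omega) (by omega)
      obtain ⟨ihg, ihc⟩ := ihh
      have hSsub : ((n : Int) - (num + v) + v - 1) / v = ((n : Int) - num + v - 1) / v - 1 := by
        have he : (n : Int) - (num + v) + v - 1 = ((n : Int) - num + v - 1) + (-1) * v := by ring
        rw [he, Int.add_mul_ediv_right _ _ (by omega : v ≠ 0)]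
        ring
      have hS1 : 1 ≤ ((n : Int) - num + v - 1) / v := by
        rw [Int.le_ediv_iff_mul_le (by omega)]; omega
      set m := d.getD i 0 with hm
      set S := ((n : Int) - num + v - 1) / v with hS
      set t := max 0 (min (m - 1) S) with ht
      set t' := max 0 (min (m - 1 - 1) (S - 1)) with ht'
      have ht1 : 1 ≤ t := by omega
      have htt : t = t' + 1 := by omega
      -- the combined condition equivalence
      have hiff : ∀ k, (k = num + v ∨ (num + v < k ∧ k ≤ (num + v) + t' * v ∧ (k - (num + v)) % v = 0))
          ↔ (num < k ∧ k ≤ num + t * v ∧ (k - num) % v = 0) := by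
        intro k
        by_cases hdvd : (k - num) % v = 0
        · obtain ⟨s, hs⟩ := Int.dvd_of_emod_eq_zero hdvd
          have hdvd' : (k - (num + v)) % v = 0 := by
            have he : k - (num + v) = (k - num) - v := by ring
            rw [he, Int.sub_emod_right, hdvd]
          have e1 : num < k ↔ 1 ≤ s := ⟨fun h => by nlinarith, fun h => by nlinarith⟩
          have e2 : k ≤ num + t * v ↔ s ≤ t := ⟨fun h => by nlinarith, fun h => by nlinarith⟩
          have e2' : k ≤ (num + v) + t' * v ↔ s ≤ t' + 1 := ⟨fun h => by nlinarith, fun h => by nlinarith⟩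
          have e3 : num + v < k ↔ 2 ≤ s := ⟨fun h => by nlinarith, fun h => by nlinarith⟩
          have e4 : k = num + v ↔ s = 1 := by
            constructor
            · intro h; nlinarith
            · intro h; rw [h] at hs; omega
          constructor
          · rintro (h | ⟨h1, h2, _⟩)
            · have hs1 := e4.mp h
              exact ⟨e1.mpr (by omega), e2.mpr (by omega), hdvd⟩
            · have hs2 := e3.mp h1
              have hs3 := e2'.mp h2
              exact ⟨e1.mpr (by omega), e2.mpr (by omega), hdvd⟩
          · rintro ⟨h1, h2, _⟩
            have hs1 := e1.mp h1
            have hs2 := e2.mp h2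
            by_cases hone : s = 1
            · exact Or.inl (e4.mpr hone)
            · exact Or.inr ⟨e3.mpr (by omega), e2'.mpr (by omega), hdvd'⟩
        · have hdvd' : ¬ (k - (num + v)) % v = 0 := by
            have he : k - (num + v) = (k - num) - v := by ring
            rw [he, Int.sub_emod_right]; exact hdvd
          constructor
          · rintro (h | ⟨_, _, h3⟩)
            · exfalso; apply hdvd
              rw [h]
              have he2 : num + v - num = v := by ring
              rw [he2]; exact Int.emod_self
            · exact absurd h3 hdvd'
          · rintro ⟨_, _, h3⟩
            exact absurd h3 hdvd
      have hdisj : ∀ k, k = num + v → ¬ (num + v < k ∧ k ≤ (num + v) + t' * v ∧ (k - (num + v)) % v = 0) := by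
        intro k hk hcontra
        rw [hk] at hcontra
        rcases hcontra with ⟨hlt, -, -⟩
        omega
      constructor
      · intro k
        rw [hstep, ihg k, hd3i, hSsub]
        by_cases hk : k = i
        · rw [if_pos hk, if_pos hk]
          omega
        · rw [if_neg hk, if_neg hk, hd3k k hk]
          by_cases hA' : num + v < k ∧ k ≤ (num + v) + t' * v ∧ (k - (num + v)) % v = 0
          · have hA := (hiff k).mp (Or.inr hA')
            have hne : ¬ k = num + v := fun hh => hdisj k hh hA'
            rw [if_neg hne, if_pos hA', if_pos hA]
            omega
          · by_cases hkn : k = num + v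
            · have hA := (hiff k).mp (Or.inl hkn)
              rw [if_pos hkn, if_neg hA', if_pos hA]
              omega
            · have hnA : ¬ (num < k ∧ k ≤ num + t * v ∧ (k - num) % v = 0) := by
                intro hh
                rcases (hiff k).mpr hh with h | h
                · exact hkn h
                · exact hA' h
              rw [if_neg hkn, if_neg hA', if_neg hnA]
              omega
      · intro k hk
        rw [hstep, ihc k hk, hd3c k hk, hd3i, hSsub]
        rw [Bool.eq_iff_iff]
        simp only [Bool.or_eq_true, beq_iff_eq, decide_eq_true_eq]
        constructor
        · rintro ((h | h) | h)
          · exact Or.inr ((hiff k).mp (Or.inl h))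
          · exact Or.inl h
          · exact Or.inr ((hiff k).mp (Or.inr h))
        · rintro (h | h)
          · exact Or.inl (Or.inr h)
          · rcases (hiff k).mpr h with h2 | h2
            · exact Or.inl (Or.inl h2)
            · exact Or.inr h2
    case neg =>
      have hres : pvInnerA n v i (f+1) d num = d := by
        simp only [pvInnerA, if_neg hcond]
      have ht0 : max 0 (min (d.getD i 0 - 1) (((n : Int) - num + v - 1) / v)) = 0 := by
        rcases not_and_or.mp hcond with h | h
        · omega
        · have hlt : ((n : Int) - num + v - 1) / v < 1 := by
            rw [Int.ediv_lt_iff_lt_mul (by omega)]; omega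
          omega
      rw [hres, ht0]
      constructor
      · intro k
        by_cases hk : k = i
        · rw [if_pos hk, hk]; omega
        · rw [if_neg hk, if_neg (by rintro ⟨ha, hb, -⟩; omega)]
          omega
      · intro k hk
        rw [decide_eq_false (show ¬ (num < k ∧ k ≤ num + 0 * v ∧ (k - num) % v = 0) by
          rintro ⟨ha, hb, -⟩; omega)]
        simp

theorem outer_spec (nums : List Int) (v : Int) (hv : 1 ≤ v) :
    ∀ (L : Nat) (i : Int) (d : PySem.Dict Int Int), 0 ≤ i → i + (L : Int) = (nums.length : Int) →
    INVN nums v i d → (∀ j, 0 ≤ j → j < i → ¬ badN nums v j) →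
    (0 ≤ pvOuterA nums.length v (PySem.List.pyRange i (nums.length : Int)) d ∧
     pvOuterA nums.length v (PySem.List.pyRange i (nums.length : Int)) d ≤ (nums.length : Int) ∧
     (∀ j, 0 ≤ j → j < pvOuterA nums.length v (PySem.List.pyRange i (nums.length : Int)) d → ¬ badN nums v j) ∧
     (pvOuterA nums.length v (PySem.List.pyRange i (nums.length : Int)) d < (nums.length : Int) →
        badN nums v (pvOuterA nums.length v (PySem.List.pyRange i (nums.length : Int)) d))) := by
  intro L
  induction L with
  | zero =>
    intro i d h0i hiL hinv hpre
    have hieq : i = (nums.length : Int) := by push_cast at hiL; omega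
    rw [hieq, PySem.List.pyRange_one_eq_nil (le_refl _)]
    simp only [pvOuterA]
    refine ⟨by positivity, le_refl _, ?_, ?_⟩
    · intro j hj0 hjn
      exact hpre j hj0 (hieq ▸ hjn)
    · intro h
      exact absurd h (lt_irrefl _)
  | succ L ihL =>
    intro i d h0i hiL hinv hpre
    have hin : i < (nums.length : Int) := by push_cast at hiL; omega
    rw [PySem.List.pyRange_one_cons hin]
    simp only [pvOuterA]
    unfold INVN at hinv
    obtain ⟨hgd, hcont⟩ := hinv i (le_refl i)
    by_cases hiv : i < v
    · have hri : i % v = i := Int.emod_eq_of_lt h0i hiv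
      have hvali : valN nums v i i = cN nums v i := by
        unfold valN
        rw [hri, if_pos (le_refl i), if_pos hiv]
      by_cases hc0 : cN nums v i = 0
      · have hcf : d.contains i = false := by
          cases hb : d.contains i
          · rfl
          · exact absurd (hcont.mp hb) (by rw [hvali, hc0]; simp)
        rw [if_pos hcf]
        refine ⟨h0i, by omega, ?_, ?_⟩
        · intro j hj0 hji; exact hpre j hj0 hji
        · intro _
          unfold badN; rw [hri, hc0]; simp
      · have hct : d.contains i = true := hcont.mpr (by rw [hvali]; exact hc0)
        rw [if_neg (by rw [hct]; simp)]
        have hgdi : d.getD i 0 = cN nums v i := by rw [hgd, hvali]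
        by_cases hcgt : d.getD i 0 > 1
        · rw [if_pos hcgt]
          have hmle : d.getD i 0 ≤ ((nums.length + 1 : Nat) : Int) := by
            rw [hgdi]; push_cast; have := cN_le_len nums v i; omega
          obtain ⟨ig, ic⟩ := inner_spec nums.length v i hv (nums.length + 1) d i (le_refl i) hmle (by omega)
          set m := d.getD i 0 with hm
          set S := ((nums.length : Int) - i + v - 1) / v with hS
          set t := max 0 (min (m - 1) S) with ht
          have hS1 : 1 ≤ S := by rw [hS, Int.le_ediv_iff_mul_le (by omega)]; omega
          have ht1 : 1 ≤ t := by omega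
          refine ihL (i+1) (pvInnerA nums.length v i (nums.length + 1) d i) (by omega)
            (by push_cast at hiL ⊢; omega) ?_ ?_
          · unfold INVN
            intro k hk1
            have hki : k ≠ i := by omega
            obtain ⟨hgdk, hcontk⟩ := hinv k (by omega)
            by_cases hdvd : (k - i) % v = 0
            · obtain ⟨s, hs⟩ := Int.dvd_of_emod_eq_zero hdvd
              have hs1 : 1 ≤ s := by nlinarith
              have hkv : v ≤ k - i := by nlinarith
              have hkmod : k / v = s ∧ k % v = i :=
                (Int.ediv_emod_unique (by omega)).mpr (by refine ⟨by omega, h0i, hiv⟩)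
              have hvik : valN nums v i k = 0 := by
                unfold valN
                rw [hkmod.2, if_pos (le_refl i), if_neg (show ¬ k < v by omega)]
              have hvik1 : valN nums v (i+1) k =
                  if (s ≤ cN nums v i - 1 ∧ k < (nums.length : Int) + v) then 1 else 0 := by
                unfold valN
                rw [hkmod.2, hkmod.1, if_neg (by omega)]
                by_cases hcc : s ≤ cN nums v i - 1 ∧ k < (nums.length : Int) + v
                · rw [if_pos ⟨by omega, hcc.1, hcc.2⟩, if_pos hcc]
                · rw [if_neg (fun hh => hcc ⟨hh.2.1, hh.2.2⟩), if_neg hcc]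
              have hseq : k ≤ i + t * v ↔ (s ≤ cN nums v i - 1 ∧ k < (nums.length : Int) + v) := by
                have h1 : k ≤ i + t * v ↔ s ≤ t := ⟨fun h => by nlinarith, fun h => by nlinarith⟩
                have h2 : s ≤ S ↔ k < (nums.length : Int) + v := by
                  rw [hS]
                  constructor
                  · intro h
                    have := (Int.le_ediv_iff_mul_le (by omega : (0:Int) < v)).mp h
                    nlinarith
                  · intro h
                    rw [Int.le_ediv_iff_mul_le (by omega)]
                    nlinarith
                rw [h1]
                constructor
                · intro h
                  exact ⟨by omega, h2.mp (by omega)⟩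
                · intro hh
                  have := h2.mpr hh.2
                  omega
              constructor
              · rw [ig k, if_neg hki, hgdk, hvik, hvik1]
                by_cases hcc : s ≤ cN nums v i - 1 ∧ k < (nums.length : Int) + v
                · rw [if_pos hcc, if_pos ⟨by omega, hseq.mpr hcc, hdvd⟩]
                  omega
                · rw [if_neg hcc, if_neg (fun hh => hcc (hseq.mp hh.2.1))]
                  omega
              · rw [ic k hki]
                have hcf : d.contains k = false := by
                  cases hb : d.contains k
                  · rfl
                  · exact absurd (hcontk.mp hb) (by rw [hvik]; simp)
                rw [hcf, hvik1, Bool.false_or]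
                by_cases hcc : s ≤ cN nums v i - 1 ∧ k < (nums.length : Int) + v
                · rw [if_pos hcc, decide_eq_true ⟨by omega, hseq.mpr hcc, hdvd⟩]
                  simp
                · rw [if_neg hcc, decide_eq_false (fun hh => hcc (hseq.mp hh.2.1))]
                  simp
            · have hkm : k % v ≠ i := by
                intro hh
                apply hdvd
                have h0 := Int.ediv_add_emod k v
                have heq : k - i = v * (k / v) := by omega
                rw [heq]
                exact Int.mul_emod_right v (k / v)
              have hvv : valN nums v (i+1) k = valN nums v i k := by
                unfold valN
                exact if_congr (by omega) rfl rfl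
              have hind : ¬ (i < k ∧ k ≤ i + t * v ∧ (k - i) % v = 0) := fun hh => hdvd hh.2.2
              constructor
              · rw [ig k, if_neg hki, if_neg hind, hgdk, hvv]
                omega
              · rw [ic k hki, hvv, decide_eq_false hind, Bool.or_false]
                exact hcontk
          · intro j hj0 hji
            by_cases hjei : j = i
            · subst hjei
              intro hb
              unfold badN at hb
              rw [hri] at hb
              nlinarith [hb]
            · exact hpre j hj0 (by omega)
        · rw [if_neg hcgt]
          have hc1' : cN nums v i = 1 := by
            have := cN_nonneg nums v i
            rw [← hgdi]
            rw [← hgdi] at hc0 this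
            omega
          refine ihL (i+1) d (by omega) (by push_cast at hiL ⊢; omega) ?_ ?_
          · unfold INVN
            intro k hk1
            have hki : k ≠ i := by omega
            obtain ⟨hgdk, hcontk⟩ := hinv k (by omega)
            have hvv : valN nums v (i+1) k = valN nums v i k := by
              by_cases hdvd : (k - i) % v = 0
              · obtain ⟨s, hs⟩ := Int.dvd_of_emod_eq_zero hdvd
                have hs1 : 1 ≤ s := by nlinarith
                have hkv : v ≤ k - i := by nlinarith
                have hkmod : k / v = s ∧ k % v = i :=
                  (Int.ediv_emod_unique (by omega)).mpr (by refine ⟨by omega, h0i, hiv⟩)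
                unfold valN
                rw [hkmod.2, hkmod.1]
                rw [if_neg (show ¬ i + 1 ≤ i by omega), if_pos (le_refl i)]
                rw [if_neg (show ¬ k < v by omega)]
                rw [if_neg (show ¬ (1 ≤ s ∧ s ≤ cN nums v i - 1 ∧ k < (nums.length : Int) + v) from
                  fun hh => by rw [hc1'] at hh; omega)]
              · have hkm : k % v ≠ i := by
                  intro hh
                  apply hdvd
                  have h0 := Int.ediv_add_emod k v
                  have heq : k - i = v * (k / v) := by omega
                  rw [heq]
                  exact Int.mul_emod_right v (k / v)
                unfold valN
                exact if_congr (by omega) rfl rfl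
            exact ⟨by rw [hgdk, hvv], by rw [hvv]; exact hcontk⟩
          · intro j hj0 hji
            by_cases hjei : j = i
            · subst hjei
              intro hb
              unfold badN at hb
              rw [hri, hc1', one_mul] at hb
              omega
            · exact hpre j hj0 (by omega)
    · have hq1 : 1 ≤ i / v := by rw [Int.le_ediv_iff_mul_le (by omega)]; omega
      have hr0 : 0 ≤ i % v := Int.emod_nonneg i (by omega)
      have hrv : i % v < v := Int.emod_lt_of_pos i (by omega)
      have hvali : valN nums v i i = (if i / v ≤ cN nums v (i % v) - 1 then 1 else 0) := by
        unfold valN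
        rw [if_neg (by omega)]
        by_cases hcc : i / v ≤ cN nums v (i % v) - 1
        · rw [if_pos ⟨hq1, hcc, by omega⟩, if_pos hcc]
        · rw [if_neg (fun hh => hcc hh.2.1), if_neg hcc]
      by_cases hcq : i / v ≤ cN nums v (i % v) - 1
      · have hct : d.contains i = true := hcont.mpr (by rw [hvali, if_pos hcq]; norm_num)
        rw [if_neg (by rw [hct]; simp)]
        rw [if_neg (by rw [hgd, hvali, if_pos hcq]; omega)]
        refine ihL (i+1) d (by omega) (by push_cast at hiL ⊢; omega) ?_ ?_
        · unfold INVN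
          intro k hk1
          obtain ⟨hgdk, hcontk⟩ := hinv k (by omega)
          have hvv : valN nums v (i+1) k = valN nums v i k := by
            unfold valN
            have h1 := Int.emod_lt_of_pos k (by omega : (0:Int) < v)
            exact if_congr (by omega) rfl rfl
          exact ⟨by rw [hgdk, hvv], by rw [hvv]; exact hcontk⟩
        · intro j hj0 hji
          by_cases hjei : j = i
          · subst hjei
            intro hb
            rw [badN_iff nums v j hv] at hb
            omega
          · exact hpre j hj0 (by omega)
      · have hcf : d.contains i = false := by
          cases hb : d.contains i
          · rfl
          · exact absurd (hcont.mp hb) (by rw [hvali, if_neg hcq]; simp)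
        rw [if_pos hcf]
        refine ⟨h0i, by omega, ?_, ?_⟩
        · intro j hj0 hji; exact hpre j hj0 hji
        · intro _
          rw [badN_iff nums v i hv]
          omega

theorem foldl_enum_modify (v : Int) :
    ∀ (l : List Int) (s : Int) (dd : PySem.Dict Int Int),
    (PySem.List.enumerate l s).foldl (fun d p => d.modify (pvResA p.2 v) 0 (· + 1)) dd =
      l.foldl (fun d x => d.modify (pvResA x v) 0 (· + 1)) dd := by
  intro l
  induction l with
  | nil => intro s dd; simp [PySem.List.enumerate]
  | cons x t ih =>
    intro s dd
    rw [PySem.List.enumerate_cons]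
    simp only [List.foldl_cons]
    exact ih (s+1) _

theorem counter_init_eq (nums : List Int) (v : Int) (hv : 1 ≤ v) :
    (PySem.List.enumerate nums 0).foldl
      (fun d p => d.modify (pvResA p.2 v) 0 (· + 1)) (PySem.Dict.empty : PySem.Dict Int Int) =
    PySem.Dict.counter (nums.map (fun x => x % v)) := by
  rw [foldl_enum_modify v nums 0 PySem.Dict.empty]
  rw [PySem.Dict.counter_eq_foldl, List.foldl_map]
  have hfun : (fun (d : PySem.Dict Int Int) (x : Int) => d.modify (pvResA x v) 0 (· + 1)) =
      (fun (d : PySem.Dict Int Int) (y : Int) => d.modify (y % v) 0 (fun x => x + 1)) := by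
    funext d x
    rw [pvResA_eq x v hv, PySem.Int.mod_eq_emod_of_pos (by omega)]
  rw [hfun]

theorem INVN_init (nums : List Int) (v : Int) (hv : 1 ≤ v) :
    INVN nums v 0 ((PySem.List.enumerate nums 0).foldl
      (fun d p => d.modify (pvResA p.2 v) 0 (· + 1)) (PySem.Dict.empty : PySem.Dict Int Int)) := by
  unfold INVN
  intro k hk0
  rw [counter_init_eq nums v hv]
  have hgd : (PySem.Dict.counter (nums.map (fun x => x % v))).getD k 0 = cN nums v k :=
    PySem.Dict.getD_counter _ _
  have hknn : 0 ≤ k % v := Int.emod_nonneg k (by omega)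
  have hczero : ¬ k < v → cN nums v k = 0 := by
    intro hkv
    unfold cN
    rw [List.count_eq_zero.mpr]
    · rfl
    · intro hmem
      rw [List.mem_map] at hmem
      obtain ⟨y, _, hy⟩ := hmem
      have := Int.emod_lt_of_pos y (show (0:Int) < v by omega)
      omega
  constructor
  · rw [hgd]
    unfold valN
    rw [if_pos hknn]
    by_cases hkv : k < v
    · rw [if_pos hkv]
    · rw [if_neg hkv, hczero hkv]
  · rw [PySem.Dict.contains_counter]
    unfold valN
    rw [if_pos hknn]
    have hmc : (nums.map (fun x => x % v)).contains k = true ↔ cN nums v k ≠ 0 := by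
      rw [List.contains_iff_mem, ← List.count_pos_iff]
      unfold cN
      omega
    by_cases hkv : k < v
    · rw [if_pos hkv]
      exact hmc
    · rw [if_neg hkv]
      constructor
      · intro h
        exact absurd (hmc.mp h) (by rw [hczero hkv]; simp)
      · intro h
        exact absurd rfl h

theorem main_eq (nums : List Int) (value : Int) (hv : 1 ≤ value) :
    findSmallestIntegerSlow nums value = findSmallestIntegerSlow_alt nums value := by
  unfold findSmallestIntegerSlow
  by_cases h1 : value = 1
  · rw [if_pos h1]
    subst h1
    obtain ⟨hMbad, hM0⟩ := alt_bad nums 1 (le_refl 1)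
    have hMn := alt_le_len nums 1 (le_refl 1)
    unfold badN at hMbad
    rw [Int.emod_one] at hMbad
    have hcn : cN nums 1 0 = (nums.length : Int) := by
      unfold cN
      rw [List.count_eq_length.mpr]
      · rw [List.length_map]
      · intro b hb
        rw [List.mem_map] at hb
        obtain ⟨y, _, hy⟩ := hb
        rw [← hy, Int.emod_one]
    rw [hcn] at hMbad
    omega
  · rw [if_neg h1]
    show pvOuterA nums.length value (PySem.List.pyRange 0 (nums.length : Int))
      ((PySem.List.enumerate nums 0).foldl
        (fun d p => d.modify (pvResA p.2 value) 0 (· + 1)) (PySem.Dict.empty : PySem.Dict Int Int))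
      = findSmallestIntegerSlow_alt nums value
    obtain ⟨hA0, hAn, hAmin, hAbad⟩ := outer_spec nums value hv nums.length 0 _ (le_refl 0)
      (by push_cast; ring) (INVN_init nums value hv) (by intro j hj0 hj1; omega)
    obtain ⟨hMbad, hM0⟩ := alt_bad nums value hv
    have hMn := alt_le_len nums value hv
    have hMmin := alt_min nums value hv
    by_cases hAn' : pvOuterA nums.length value (PySem.List.pyRange 0 (nums.length : Int))
        ((PySem.List.enumerate nums 0).foldl
          (fun d p => d.modify (pvResA p.2 value) 0 (· + 1)) (PySem.Dict.empty : PySem.Dict Int Int))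
        < (nums.length : Int)
    · have hAb := hAbad hAn'
      rcases lt_trichotomy (pvOuterA nums.length value (PySem.List.pyRange 0 (nums.length : Int))
        ((PySem.List.enumerate nums 0).foldl
          (fun d p => d.modify (pvResA p.2 value) 0 (· + 1)) (PySem.Dict.empty : PySem.Dict Int Int)))
        (findSmallestIntegerSlow_alt nums value) with h | h | h
      · exact absurd hAb (hMmin _ hA0 h)
      · exact h
      · exact absurd hMbad (hAmin _ hM0 h)
    · rcases lt_trichotomy (findSmallestIntegerSlow_alt nums value) (nums.length : Int) with h | h | h
      · exact absurd hMbad (hAmin _ hM0 (by omega))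
      · omega
      · omega

-- ===== VERDICT (by name: the statement is the Claim_ definition above) =====
theorem findSmallestIntegerSlow_spec : Claim_equal_findSmallestIntegerSlow := by
  intro nums value _ hpre
  show findSmallestIntegerSlow nums value = findSmallestIntegerSlow_alt nums value
  exact main_eq nums value hpre
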